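-- pv_equiv track=rewrite | github.com/nijes/programmers_codingtest | level_1/이상한_문자_만들기.py | solution
-- ===== SOURCE A (Python) =====
-- def solution(s):
--     answer = ''
--     idx = 0
--     while idx < len(s):
--         if s[idx] == ' ':
--             answer += ' '
--             idx += 1
--         else:
--             start = idx
--             while idx < len(s) and s[idx] != ' ':
--                 answer += s[idx].upper() if (idx-start)%2==0 else s[idx].lower()
--                 idx += 1
--     return answer
-- ===== SOURCE B (Python) =====
-- def solution(s):
--     return ' '.join(
--         ''.join(c.upper() if i % 2 == 0 else c.lower() for i, c in enumerate(w))
--         for w in s.split(' ')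
--     )
-- ===== Notes on version B (the rewrite author's own statement) =====
-- stated objective: idiomatic
-- what changed: Replaces the flat character-by-character while-loop state machine (manual index, nested inner word loop, repeated string += concatenation) with a split/map/join pipeline casing each word by a per-word enumerate comprehension; single-space split preserves empty segments so space runs round-trip exactly, and join builds the result linearly where A's repeated += is quadratic.
import Mathlib
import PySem

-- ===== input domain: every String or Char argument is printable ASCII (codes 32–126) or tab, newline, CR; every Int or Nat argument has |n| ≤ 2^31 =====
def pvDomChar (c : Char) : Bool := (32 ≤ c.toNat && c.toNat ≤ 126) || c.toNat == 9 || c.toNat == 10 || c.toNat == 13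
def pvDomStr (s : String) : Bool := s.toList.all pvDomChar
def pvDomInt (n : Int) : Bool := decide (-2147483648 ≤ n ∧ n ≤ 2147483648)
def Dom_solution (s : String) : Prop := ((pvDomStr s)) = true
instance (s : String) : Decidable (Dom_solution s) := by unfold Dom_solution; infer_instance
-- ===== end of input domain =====

-- B differs from A only in decomposition (split/map/join pipeline vs flat index loop); same output.

-- ===== PORT A =====
-- inner while loop of A: consumes chars until a space (or end), j = idx - start;
-- returns (emitted characters, remaining suffix of the string)
def solAInner (cs : List Char) (j : Nat) : List Char × List Char :=
  match cs with
  | [] => ([], [])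
  | c :: rest =>
    if c = ' ' then ([], c :: rest)
    else
      let p := solAInner rest (j + 1)
      ((if j % 2 = 0 then PySem.Chars.upperChar c else PySem.Chars.lowerChar c) :: p.1, p.2)

-- needed by solAOuter's termination proof (the inner loop only consumes characters)
theorem solAInner_snd_length_le (cs : List Char) (j : Nat) :
    (solAInner cs j).2.length ≤ cs.length := by
  induction cs generalizing j with
  | nil => simp [solAInner]
  | cons c rest ih =>
    by_cases h : c = ' '
    · simp [solAInner, h]
    · simpa [solAInner, h] using Nat.le_succ_of_le (ih (j + 1))

-- outer while loop of A
def solAOuter (cs : List Char) : List Char :=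
  match cs with
  | [] => []
  | c :: rest =>
    if h : c = ' ' then ' ' :: solAOuter rest
    else
      let p := solAInner (c :: rest) 0
      p.1 ++ solAOuter p.2
termination_by cs.length
decreasing_by
  · simp
  · simp only [solAInner, h, if_false]
    exact Nat.lt_succ_of_le (solAInner_snd_length_le rest 1)

def solution (s : String) : String := String.mk (solAOuter s.toList)

-- ===== PORT B =====
-- B: one word's comprehension — enumerate, even index upper, odd lower
def caseWordB (w : List Char) : List Char :=
  (PySem.List.enumerate w).map
    (fun p => if PySem.Int.mod p.1 2 = 0 then PySem.Chars.upperChar p.2 else PySem.Chars.lowerChar p.2)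

def solution_alt (s : String) : String :=
  String.mk (PySem.Chars.join [' '] ((PySem.Chars.splitOn s.toList [' ']).map caseWordB))

-- ===== PRECONDITION & SPEC =====
def Spec_solution (s : String) (out : String) : Prop := out = solution_alt s
instance (s : String) (out : String) : Decidable (Spec_solution s out) := by unfold Spec_solution; infer_instance

-- ===== CLAIM (what is proved, stated in full; the proofs are below) =====
def Claim_equal_solution : Prop := ∀ (s : String), Dom_solution s → Spec_solution s (solution s)

-- ===== LEMMAS AND PROOFS =====

-- unfolding equations for the well-founded solAOuter
theorem solAOuter_nil : solAOuter [] = [] := by rw [solAOuter.eq_def]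

theorem solAOuter_space (rest : List Char) : solAOuter (' ' :: rest) = ' ' :: solAOuter rest := by
  rw [solAOuter.eq_def]; simp

theorem solAOuter_word (c : Char) (rest : List Char) (h : c ≠ ' ') :
    solAOuter (c :: rest)
      = (solAInner (c :: rest) 0).1 ++ solAOuter (solAInner (c :: rest) 0).2 := by
  rw [solAOuter.eq_def]; simp [h]

-- reference casing of a word starting at parity index j
def caseFrom (j : Nat) : List Char → List Char
  | [] => []
  | c :: rest =>
    (if j % 2 = 0 then PySem.Chars.upperChar c else PySem.Chars.lowerChar c) :: caseFrom (j + 1) rest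

-- reference split on a single space character
def splitSp : List Char → List (List Char)
  | [] => [[]]
  | c :: rest => if c = ' ' then [] :: splitSp rest else (splitSp rest).modifyHead (c :: ·)

theorem splitSp_ne_nil (cs : List Char) : splitSp cs ≠ [] := by
  induction cs with
  | nil => simp [splitSp]
  | cons c rest ih =>
    by_cases h : c = ' '
    · simp [splitSp, h]
    · simp only [splitSp, if_neg h]
      cases hs : splitSp rest with
      | nil => exact absurd hs ih
      | cons a l => simp

theorem splitOn_go_eq (cs : List Char) : ∀ (cur : List Char) (acc : List (List Char)),
    PySem.Chars.splitOn.go [' '] (cs.length + 1) cs cur acc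
      = acc.reverse ++ (splitSp cs).modifyHead (cur.reverse ++ ·) := by
  induction cs with
  | nil => intro cur acc; simp [PySem.Chars.splitOn.go, splitSp]
  | cons c rest ih =>
    intro cur acc
    by_cases h : c = ' '
    · subst h
      have hpre : [' '].isPrefixOf (' ' :: rest) = true := by simp [List.isPrefixOf]
      simp only [PySem.Chars.splitOn.go, List.length_cons, hpre, if_true,
        List.length_nil, List.drop_succ_cons, List.drop_zero]
      rw [ih [] (cur.reverse :: acc)]
      have hid : List.modifyHead (fun x : List Char => x) (splitSp rest) = splitSp rest := by
        cases splitSp rest <;> simp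
      simp [splitSp, hid]
    · have hpre : [' '].isPrefixOf (c :: rest) = false := by
        simp only [List.isPrefixOf, Bool.and_eq_false_iff, beq_eq_false_iff_ne]
        exact Or.inl (fun e => h e.symm)
      simp only [PySem.Chars.splitOn.go, List.length_cons, hpre, Bool.false_eq_true, if_false]
      rw [ih (c :: cur) acc]
      simp only [splitSp, if_neg h, List.reverse_cons]
      cases hs : splitSp rest with
      | nil => exact absurd hs (splitSp_ne_nil rest)
      | cons a l => simp

theorem splitOn_eq_splitSp (cs : List Char) :
    PySem.Chars.splitOn cs [' '] = splitSp cs := by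
  have h1 := splitOn_go_eq cs [] []
  have hid : List.modifyHead (fun x : List Char => x) (splitSp cs) = splitSp cs := by
    cases splitSp cs <;> simp
  simpa [PySem.Chars.splitOn, hid] using h1

theorem splitSp_word (w : List Char) (hw : ∀ c ∈ w, c ≠ ' ') (rest : List Char) :
    splitSp (w ++ rest) = (splitSp rest).modifyHead (w ++ ·) := by
  induction w with
  | nil =>
    cases hs : splitSp rest with
    | nil => exact absurd hs (splitSp_ne_nil rest)
    | cons a l => simp [hs]
  | cons c w' ih =>
    have hc : c ≠ ' ' := hw c (by simp)
    simp only [List.cons_append, splitSp, if_neg hc,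
      ih (fun d hd => hw d (by simp [hd]))]
    cases hs : splitSp rest with
    | nil => exact absurd hs (splitSp_ne_nil rest)
    | cons a l => simp

theorem caseWordB_eq_caseFrom (w : List Char) : caseWordB w = caseFrom 0 w := by
  have key : ∀ (w : List Char) (j : Nat),
      ((PySem.List.enumerate w (j : Int)).map
        (fun p => if PySem.Int.mod p.1 2 = 0 then PySem.Chars.upperChar p.2
                  else PySem.Chars.lowerChar p.2)) = caseFrom j w := by
    intro w
    induction w with
    | nil => intro j; simp [PySem.List.enumerate, caseFrom]
    | cons c rest ih =>
      intro j
      have hmod : PySem.Int.mod (j : Int) 2 = ((j % 2 : Nat) : Int) :=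
        PySem.Int.mod_natCast j 2
      have hcast : ((j : Int) + 1) = ((j + 1 : Nat) : Int) := by push_cast; ring
      simp only [PySem.List.enumerate, List.map, caseFrom, hcast, ih (j + 1), hmod]
      by_cases hj : j % 2 = 0
      · have h0 : ((j % 2 : Nat) : Int) = 0 := by exact_mod_cast hj
        rw [if_pos h0, if_pos hj]
      · have h0 : ((j % 2 : Nat) : Int) ≠ 0 := by exact_mod_cast hj
        rw [if_neg h0, if_neg hj]
  exact key w 0

theorem solAInner_spec (cs : List Char) : ∀ (j : Nat),
    solAInner cs j = (caseFrom j (cs.takeWhile (· ≠ ' ')), cs.dropWhile (· ≠ ' ')) := by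
  induction cs with
  | nil => intro j; simp [solAInner, caseFrom]
  | cons c rest ih =>
    intro j
    by_cases h : c = ' '
    · simp [solAInner, h, List.takeWhile, List.dropWhile, caseFrom]
    · simp [solAInner, h, List.takeWhile, List.dropWhile, ih (j + 1), caseFrom]

theorem join_cons_splitSp (x rs : List Char) :
    PySem.Chars.join [' '] (caseWordB x :: (splitSp rs).map caseWordB)
      = caseWordB x ++ ' ' :: PySem.Chars.join [' '] ((splitSp rs).map caseWordB) := by
  cases hs : splitSp rs with
  | nil => exact absurd hs (splitSp_ne_nil rs)
  | cons a l => simp [PySem.Chars.join_cons_cons]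

theorem caseWordB_nil : caseWordB [] = [] := by
  simp [caseWordB, PySem.List.enumerate]

theorem solAOuter_eq_join (cs : List Char) :
    solAOuter cs = PySem.Chars.join [' '] ((splitSp cs).map caseWordB) := by
  induction hn : cs.length using Nat.strong_induction_on generalizing cs with
  | _ n ih =>
  cases cs with
  | nil =>
    simp [solAOuter_nil, splitSp, PySem.Chars.join_singleton, caseWordB_nil]
  | cons c rest =>
    by_cases h : c = ' '
    · subst h
      rw [solAOuter_space, ih rest.length (by simp at hn; omega) rest rfl]
      have hsp0 : splitSp (' ' :: rest) = [] :: splitSp rest := by simp [splitSp]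
      rw [hsp0, List.map_cons, join_cons_splitSp, caseWordB_nil]
      simp
    · rw [solAOuter_word c rest h, solAInner_spec (c :: rest) 0]
      set w := (c :: rest).takeWhile (· ≠ ' ') with hw
      set rem := (c :: rest).dropWhile (· ≠ ' ') with hrem
      have hsplit : w ++ rem = c :: rest := List.takeWhile_append_dropWhile
      have hwchars : ∀ d ∈ w, d ≠ ' ' := by
        intro d hd
        have := List.mem_takeWhile_imp hd
        simpa using this
      have hsp : splitSp (c :: rest) = (splitSp rem).modifyHead (w ++ ·) := by
        rw [← hsplit]; exact splitSp_word w hwchars rem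
      have hwne : w ≠ [] := by
        rw [hw]; simp [List.takeWhile, h]
      have hremlt : rem.length < n := by
        have h1 : w.length + rem.length = (c :: rest).length := by
          rw [← hsplit]; simp
        have h2 : 0 < w.length := List.length_pos_of_ne_nil hwne
        omega
      cases hr : rem with
      | nil =>
        have hsp1 : List.modifyHead (fun x => w ++ x) (splitSp ([] : List Char)) = [w] := by
          simp [splitSp]
        rw [hsp, hr, hsp1, List.map_cons, List.map_nil, PySem.Chars.join_singleton,
          caseWordB_eq_caseFrom, solAOuter_nil]
        simp
      | cons r rs =>
        have hrsp : r = ' ' := by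
          have hne' : (c :: rest).dropWhile (fun x => decide (x ≠ ' ')) ≠ [] := by
            rw [← hrem, hr]; simp
          have hhd := List.head_dropWhile_not (p := (fun x => decide (x ≠ ' ')))
            (l := c :: rest) hne'
          have h3 : List.dropWhile (fun x => decide (x ≠ ' ')) (c :: rest) = r :: rs := by
            rw [← hrem]; exact hr
          simp only [h3, List.head_cons] at hhd
          simpa using hhd
        subst hrsp
        have hsp2 : List.modifyHead (fun x => w ++ x) (splitSp (' ' :: rs)) = w :: splitSp rs := by
          simp [splitSp]
        rw [hsp, hr, hsp2, List.map_cons, join_cons_splitSp,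
          ← ih rs.length (by rw [hr] at hremlt; simp at hremlt; omega) rs rfl,
          caseWordB_eq_caseFrom, solAOuter_space]

-- ===== VERDICT (by name: the statement is the Claim_ definition above) =====
theorem solution_spec : Claim_equal_solution := by
  intro s _
  unfold Spec_solution solution solution_alt
  rw [splitOn_eq_splitSp, solAOuter_eq_join]
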